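-- pv_equiv track=rewrite | github.com/johndimm/nuffsaid-coding-challenge | count_schools.py | aggregate_by
-- ===== SOURCE A (Python) =====
-- def aggregate_by(data, field):
--     aggs = dict()
--     for r in data:
--         agg = r[field]
--         if not agg in aggs:
--             aggs[agg] = 0
--         aggs[agg] += 1
--     return aggs
-- ===== SOURCE B (Python) =====
-- def aggregate_by(data, field):
--     keys = dict.fromkeys(r[field] for r in data)
--     return {k: sum(1 for r in data if r[field] == k) for k in keys}
-- ===== Notes on version B (the rewrite author's own statement) =====
-- stated objective: alternative
-- what changed: Instead of a single pass maintaining a running tally in a dict, B first collects the distinct field values (first-occurrence order) and then counts each key by a separate rescan of the data.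
import Mathlib
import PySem

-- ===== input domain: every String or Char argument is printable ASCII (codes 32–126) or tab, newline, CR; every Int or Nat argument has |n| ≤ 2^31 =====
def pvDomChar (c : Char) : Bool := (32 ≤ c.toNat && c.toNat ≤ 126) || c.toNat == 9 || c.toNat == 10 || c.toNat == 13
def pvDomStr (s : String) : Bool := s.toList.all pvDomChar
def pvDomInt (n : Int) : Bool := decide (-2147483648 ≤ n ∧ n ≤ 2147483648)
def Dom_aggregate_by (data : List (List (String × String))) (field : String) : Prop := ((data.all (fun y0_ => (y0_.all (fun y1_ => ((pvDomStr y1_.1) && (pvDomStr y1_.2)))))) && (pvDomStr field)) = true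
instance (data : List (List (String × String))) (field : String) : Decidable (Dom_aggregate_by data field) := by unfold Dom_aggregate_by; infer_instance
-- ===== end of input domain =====

-- B replaces A's single accumulating dict pass by collecting the distinct field values first
-- and counting each by a separate rescan (objective: alternative decomposition, not faster).


-- r[field]: first-match lookup in the row (Python dict lookup); Pre_ guarantees the key is present,
-- so the "" default is never used on admitted inputs.
def pvRowGet (r : List (String × String)) (field : String) : String :=
  (PySem.Dict.mk r).getD field ""

-- ===== PORT A =====
-- the loop body: if agg not in aggs: aggs[agg] = 0; aggs[agg] += 1
def pvStepA (aggs : PySem.Dict String Int) (agg : String) : PySem.Dict String Int :=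
  let aggs := if aggs.contains agg then aggs else aggs.insert agg 0
  aggs.insert agg (aggs.getD agg 0 + 1)

def aggregate_by (data : List (List (String × String))) (field : String) : List (String × Int) :=
  (data.foldl (fun aggs r => pvStepA aggs (pvRowGet r field)) PySem.Dict.empty).items

-- ===== PORT B =====
def aggregate_by_alt (data : List (List (String × String))) (field : String) : List (String × Int) :=
  let keys := PySem.List.dedup (data.map (fun r => pvRowGet r field))
  keys.map (fun k => (k, ((data.filter (fun r => pvRowGet r field == k)).map (fun _ => (1 : Int))).sum))

-- ===== PRECONDITION & SPEC =====
-- Pre_ excludes exactly the inputs where some row lacks the field, on which Python A raises KeyError.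
def Pre_aggregate_by (data : List (List (String × String))) (field : String) : Prop :=
  ∀ r ∈ data, field ∈ r.map Prod.fst
instance (data : List (List (String × String))) (field : String) : Decidable (Pre_aggregate_by data field) := by unfold Pre_aggregate_by; infer_instance

def pvWitness_aggregate_by : (List (List (String × String))) × String :=
  ([[("s", "a"), ("t", "x")], [("s", "b")], [("s", "a")]], "s")

def Spec_aggregate_by (data : List (List (String × String))) (field : String) (out : List (String × Int)) : Prop := out = aggregate_by_alt data field
instance (data : List (List (String × String))) (field : String) (out : List (String × Int)) : Decidable (Spec_aggregate_by data field out) := by unfold Spec_aggregate_by; infer_instance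

-- ===== CLAIM (what is proved, stated in full; the proofs are below) =====
def Claim_equal_aggregate_by : Prop := ∀ (data : List (List (String × String))) (field : String), Dom_aggregate_by data field → Pre_aggregate_by data field → Spec_aggregate_by data field (aggregate_by data field)

-- ===== LEMMAS AND PROOFS =====

-- A's guarded body is the plain counter step.
theorem pvStepA_eq_insert (aggs : PySem.Dict String Int) (agg : String) :
    pvStepA aggs agg = aggs.insert agg (aggs.getD agg 0 + 1) := by
  unfold pvStepA
  by_cases h : aggs.contains agg = true
  · simp [h]
  · simp only [Bool.not_eq_true] at h
    have h0 : aggs.getD agg 0 = 0 := PySem.Dict.getD_of_not_contains aggs 0 h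
    simp [h, h0, PySem.Dict.getD_insert_self, PySem.Dict.insert_insert_self]

-- B's per-key rescan count is the count of the mapped key list.
theorem pvRescan_eq_count (data : List (List (String × String))) (field : String) (k : String) :
    ((data.filter (fun r => pvRowGet r field == k)).map (fun _ => (1 : Int))).sum
      = ((data.map (fun r => pvRowGet r field)).count k : Int) := by
  rw [List.count_eq_countP, List.countP_map, List.countP_eq_length_filter]
  simp
  rfl

-- ===== VERDICT (by name: the statement is the Claim_ definition above) =====
theorem aggregate_by_spec : Claim_equal_aggregate_by := by
  intro data field _ _
  unfold Spec_aggregate_by aggregate_by aggregate_by_alt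
  have hfold : data.foldl (fun aggs r => pvStepA aggs (pvRowGet r field)) PySem.Dict.empty
      = PySem.Dict.counter (data.map (fun r => pvRowGet r field)) := by
    rw [← PySem.Dict.foldl_insert_getD_add_one_eq_counter, List.foldl_map]
    exact List.foldl_ext _ _ _ (fun d r _ => pvStepA_eq_insert d (pvRowGet r field))
  rw [hfold, PySem.Dict.items_counter, ← PySem.List.dedup_eq_ofList]
  exact List.map_congr_left fun k _ => by rw [pvRescan_eq_count]
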